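-- pv_equiv track=rewrite | github.com/pypi-data/pypi-mirror-19 | packages/MMLlib/MMLlib-0.3.0.post1-py3-none-any.whl/mmllib/playlist.py | timedlist_flatten
-- ===== SOURCE A (Python) =====
-- def timedlist_flatten(timedlist):
--     """ Flatten a timedlist
--
--     Converts a multi-measure timedlist into a timed document,
--     i.e. a timedlist with only one measure.
--
--      timedlist - the timedlist
--
--     Returns a new timedlist as flattened document.
--     """
--
--     newlen = 0
--     newev = []
--
--     for measure in timedlist:
--         for ev in measure[1]:
--             newev.append((newlen + ev[0], ev[1]))
--         newlen += measure[0]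
--
--     newmeasure = (newlen, newev)
--     return (newmeasure,)
-- ===== SOURCE B (Python) =====
-- def timedlist_flatten(timedlist):
--     """Flatten a timedlist: prefix-offset table pass, then one comprehension."""
--     offsets = [0]
--     for measure in timedlist:
--         offsets.append(offsets[-1] + measure[0])
--     newev = [(off + t, v)
--              for off, (_, events) in zip(offsets, timedlist)
--              for (t, v) in events]
--     return ((offsets[-1], newev),)
-- ===== Notes on version B (the rewrite author's own statement) =====
-- stated objective: alternative
-- what changed: Replaces the single interleaved loop carrying a running offset and a mutated event list with two separated passes: first a prefix-offset table over the measure lengths, then one comprehension that zips offsets with measures to emit shifted events; total length comes from the table's last entry.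
import Mathlib
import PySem

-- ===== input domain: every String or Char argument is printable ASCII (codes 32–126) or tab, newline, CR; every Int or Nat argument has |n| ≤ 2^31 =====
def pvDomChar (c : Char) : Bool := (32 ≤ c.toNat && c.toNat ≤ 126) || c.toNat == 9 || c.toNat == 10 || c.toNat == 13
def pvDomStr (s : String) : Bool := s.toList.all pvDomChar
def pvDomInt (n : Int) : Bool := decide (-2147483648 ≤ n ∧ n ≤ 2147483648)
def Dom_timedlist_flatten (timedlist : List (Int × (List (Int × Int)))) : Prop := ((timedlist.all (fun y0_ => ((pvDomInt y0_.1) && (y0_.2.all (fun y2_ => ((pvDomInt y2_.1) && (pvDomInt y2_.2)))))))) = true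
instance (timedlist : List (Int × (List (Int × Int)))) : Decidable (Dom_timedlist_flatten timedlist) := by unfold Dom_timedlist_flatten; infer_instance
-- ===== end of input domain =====

-- B separates the interleaved offset/event loop of A into a prefix-offset table pass
-- followed by a zip comprehension (objective: alternative decomposition, same cost).


-- ===== PORT A =====
-- literal port: one loop carrying (newlen, newev); inner loop appends shifted events,
-- then newlen += measure[0]
def timedlist_flatten (timedlist : List (Int × (List (Int × Int)))) : List (Int × (List (Int × Int))) :=
  let st := timedlist.foldl
    (fun (s : Int × List (Int × Int)) measure =>
      (s.1 + measure.1, s.2 ++ measure.2.map (fun ev => (s.1 + ev.1, ev.2))))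
    (0, [])
  [(st.1, st.2)]

-- ===== PORT B =====
-- offsets = [0]; for measure in timedlist: offsets.append(offsets[-1] + measure[0])
def tfOffsets (timedlist : List (Int × (List (Int × Int)))) : List Int :=
  timedlist.foldl (fun acc measure => acc ++ [acc.getLast! + measure.1]) [0]

def timedlist_flatten_alt (timedlist : List (Int × (List (Int × Int)))) : List (Int × (List (Int × Int))) :=
  let offsets := tfOffsets timedlist
  let newev := (offsets.zip timedlist).flatMap
    (fun p => p.2.2.map (fun ev => (p.1 + ev.1, ev.2)))
  [(offsets.getLast!, newev)]

-- ===== PRECONDITION & SPEC =====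
def Spec_timedlist_flatten (timedlist : List (Int × (List (Int × Int)))) (out : List (Int × (List (Int × Int)))) : Prop := out = timedlist_flatten_alt timedlist
instance (timedlist : List (Int × (List (Int × Int)))) (out : List (Int × (List (Int × Int)))) : Decidable (Spec_timedlist_flatten timedlist out) := by unfold Spec_timedlist_flatten; infer_instance

-- ===== CLAIM (what is proved, stated in full; the proofs are below) =====
def Claim_equal_timedlist_flatten : Prop := ∀ (timedlist : List (Int × (List (Int × Int)))), Dom_timedlist_flatten timedlist → Spec_timedlist_flatten timedlist (timedlist_flatten timedlist)

-- ===== LEMMAS AND PROOFS =====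

-- proof-side closed form of the offset table tail: offsets starting after n
def offsFrom (n : Int) : List (Int × (List (Int × Int))) → List Int
  | [] => []
  | m :: r => (n + m.1) :: offsFrom (n + m.1) r

theorem tfOffsets_foldl (tl : List (Int × (List (Int × Int)))) :
    ∀ (acc : List Int) (x : Int),
      tl.foldl (fun acc measure => acc ++ [acc.getLast! + measure.1]) (acc ++ [x])
        = (acc ++ [x]) ++ offsFrom x tl := by
  induction tl with
  | nil => intro acc x; simp [offsFrom]
  | cons m r ih =>
    intro acc x
    have h1 : (acc ++ [x]).getLast! = x := by
      cases acc with
      | nil => simp [List.getLast!]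
      | cons a as => simp [List.getLast!]
    simp only [List.foldl_cons, h1, offsFrom, List.append_assoc]
    have := ih (acc ++ [x]) (x + m.1)
    simpa [List.append_assoc] using this

theorem tfOffsets_eq (tl : List (Int × (List (Int × Int)))) :
    tfOffsets tl = 0 :: offsFrom 0 tl := by
  have := tfOffsets_foldl tl [] 0
  simpa [tfOffsets] using this

theorem getLast!_cons_cons (a b : Int) (l : List Int) :
    (a :: b :: l).getLast! = (b :: l).getLast! := by
  simp [List.getLast!]

theorem foldlA_eq (tl : List (Int × (List (Int × Int)))) :
    ∀ (n : Int) (ev : List (Int × Int)),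
      tl.foldl
        (fun (s : Int × List (Int × Int)) measure =>
          (s.1 + measure.1, s.2 ++ measure.2.map (fun x => (s.1 + x.1, x.2))))
        (n, ev)
      = ((n :: offsFrom n tl).getLast!,
         ev ++ ((n :: offsFrom n tl).zip tl).flatMap
           (fun p => p.2.2.map (fun x => (p.1 + x.1, x.2)))) := by
  induction tl with
  | nil => intro n ev; simp [offsFrom, List.getLast!]
  | cons m r ih =>
    intro n ev
    simp only [List.foldl_cons]
    rw [ih (n + m.1) (ev ++ m.2.map (fun x => (n + x.1, x.2)))]
    simp only [offsFrom, List.zip_cons_cons, List.flatMap_cons,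
      getLast!_cons_cons, List.append_assoc]

-- ===== VERDICT (by name: the statement is the Claim_ definition above) =====
theorem timedlist_flatten_spec : Claim_equal_timedlist_flatten := by
  intro tl _
  unfold Spec_timedlist_flatten timedlist_flatten timedlist_flatten_alt
  rw [tfOffsets_eq, foldlA_eq tl 0 []]
  simp
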